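-- pv_equiv track=rewrite | github.com/Serial-Studio/Serial-Studio | scripts/code-verify.py | _is_banner_run
-- ===== SOURCE A (Python) =====
-- def _is_banner_payload(payload: str) -> bool:
--     """True when a comment payload is a banner decorator: empty after the
--     `//`, or punctuation-only (`---`, `===`, `***`).  These are intentional
--     section markers per CLAUDE.md and are stripped from prose runs."""
--     s = payload.strip()
--     return s == "" or set(s) <= {"-", "=", "*"}
--
-- def _is_banner_run(payloads: list[str]) -> bool:
--     """A run of consecutive `//` comment payloads is a banner when it follows
--     the project's section-marker shapes:
--
--       A) Decorators only — `//---`, `//===`, `//` (blank).  Flagging these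
--          as multi-line narration is wrong; they're rules between sections.
--       B) Sandwich — the run starts AND ends with a decorator and every
--          non-decorator line is adjacent to one.  Catches both the C++ form
--          (`//---` / `// Section` / `//---`) and the QML form
--          (`//` / `// Section` / `//`)."""
--     if not payloads:
--         return False
--
--     if all(_is_banner_payload(p) for p in payloads):
--         return True
--
--     if not _is_banner_payload(payloads[0]) or not _is_banner_payload(payloads[-1]):
--         return False
--
--     for idx, p in enumerate(payloads):
--         if _is_banner_payload(p):
--             continue
--         prev_dec = idx > 0 and _is_banner_payload(payloads[idx - 1])
--         next_dec = idx + 1 < len(payloads) and _is_banner_payload(payloads[idx + 1])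
--         if not (prev_dec or next_dec):
--             return False
--     return True
-- ===== SOURCE B (Python) =====
-- def _is_banner_payload(payload: str) -> bool:
--     """Unchanged from A: blank or punctuation-only (-, =, *) payload."""
--     s = payload.strip()
--     return s == "" or set(s) <= {"-", "=", "*"}
--
--
-- def _is_banner_run(payloads: list[str]) -> bool:
--     """Run-length characterization: a run is a banner iff it is non-empty,
--     starts and ends with a decorator, and contains no 3 consecutive
--     non-decorator lines (the middle of such a triple has no decorator
--     neighbor; runs of 1 or 2 non-decorators between decorators always do).
--     One forward pass tracking the current non-decorator run length, with an
--     early exit; no indexing into neighbors and no separate all() pass."""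
--     if not payloads:
--         return False
--     run = 0
--     for p in payloads:
--         if _is_banner_payload(p):
--             run = 0
--         else:
--             run += 1
--             if run == 3:
--                 return False
--     return run == 0 and _is_banner_payload(payloads[0])
-- ===== Notes on version B (the rewrite author's own statement) =====
-- stated objective: alternative
-- what changed: B replaces A's three staged checks (all-decorators pass, end guard, per-index neighbor lookups) with a different characterization -- a run is a banner iff it is non-empty, starts and ends with a decorator, and has no 3 consecutive non-decorator lines -- decided in one forward pass that tracks the current non-decorator run length with an early exit, never indexing neighbors.
import Mathlib
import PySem

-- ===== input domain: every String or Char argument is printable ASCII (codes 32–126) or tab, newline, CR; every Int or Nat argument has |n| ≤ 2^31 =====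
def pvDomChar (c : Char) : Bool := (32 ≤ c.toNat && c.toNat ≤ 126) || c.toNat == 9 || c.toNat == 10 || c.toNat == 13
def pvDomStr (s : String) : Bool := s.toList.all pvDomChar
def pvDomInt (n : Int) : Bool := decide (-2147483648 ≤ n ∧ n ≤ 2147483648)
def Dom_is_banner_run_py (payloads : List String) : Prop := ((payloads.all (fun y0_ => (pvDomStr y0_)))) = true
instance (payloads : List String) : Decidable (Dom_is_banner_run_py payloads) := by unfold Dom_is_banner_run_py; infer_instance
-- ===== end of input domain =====

-- B decides the run by a different characterization — nonempty, decorator ends, no 3 consecutive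
-- non-decorators — in one run-length-tracking pass (objective: alternative).

-- ===== PORT A =====
-- shared helper: Python _is_banner_payload (identical in A and B)
def banner_payload (payload : String) : Bool :=
  let s := PySem.Str.strip payload
  (s == "") || PySem.Set.issubset (PySem.Set.ofList s.toList) ['-', '=', '*']

def is_banner_run_py (payloads : List String) : Bool :=
  if payloads.isEmpty then false
  else if payloads.all (fun p => banner_payload p) then true
  else if (!banner_payload (PySem.List.pyGetD payloads 0 "")) || (!banner_payload (PySem.List.pyGetD payloads (-1) "")) then false
  else (PySem.List.enumerate payloads 0).all (fun ip =>
    if banner_payload ip.2 then true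
    else
      (decide (0 < ip.1) && banner_payload (PySem.List.pyGetD payloads (ip.1 - 1) ""))
      || (decide (ip.1 + 1 < (payloads.length : Int)) && banner_payload (PySem.List.pyGetD payloads (ip.1 + 1) "")))

-- ===== PORT B =====
-- B's loop: run-length of the current non-decorator block; 'none' = early `return False`
def bannerRunLoop : List String → Nat → Option Nat
  | [], run => some run
  | p :: t, run =>
    if banner_payload p then bannerRunLoop t 0
    else if run + 1 == 3 then none
    else bannerRunLoop t (run + 1)

def is_banner_run_py_alt (payloads : List String) : Bool :=
  if payloads.isEmpty then false
  else
    match bannerRunLoop payloads 0 with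
    | none => false
    | some run => (run == 0) && banner_payload (PySem.List.pyGetD payloads 0 "")

-- ===== PRECONDITION & SPEC =====
def Spec_is_banner_run_py (payloads : List String) (out : Bool) : Prop := out = is_banner_run_py_alt payloads
instance (payloads : List String) (out : Bool) : Decidable (Spec_is_banner_run_py payloads out) := by unfold Spec_is_banner_run_py; infer_instance

-- ===== CLAIM (what is proved, stated in full; the proofs are below) =====
def Claim_equal_is_banner_run_py : Prop := ∀ (payloads : List String), Dom_is_banner_run_py payloads → Spec_is_banner_run_py payloads (is_banner_run_py payloads)

-- ===== LEMMAS AND PROOFS =====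

-- mask-level mirror of B's loop
def runB : List Bool → Nat → Option Nat
  | [], run => some run
  | b :: t, run =>
    if b then runB t 0
    else if run + 1 == 3 then none
    else runB t (run + 1)

-- "has three consecutive false entries"
def hasFFF : List Bool → Bool
  | [] => false
  | [_] => false
  | [_, _] => false
  | a :: b :: c :: t => (!a && !b && !c) || hasFFF (b :: c :: t)

-- neighbor condition as a structural recursion (prev = virtual previous entry)
def nb3 : Bool → List Bool → Bool
  | _, [] => true
  | prev, c :: rest => (c || prev || rest.headD false) && nb3 c rest

-- neighbor condition, index form
def NbP (m : List Bool) (prev : Bool) : Prop :=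
  ∀ k, k < m.length →
    m.getD k false = true ∨ (0 < k ∧ m.getD (k - 1) false = true) ∨
    (k = 0 ∧ prev = true) ∨ (k + 1 < m.length ∧ m.getD (k + 1) false = true)

lemma enumerate_map_eq {α β : Type} (f : α → β) (l : List α) (s : Int) :
    PySem.List.enumerate (l.map f) s = (PySem.List.enumerate l s).map (fun p => (p.1, f p.2)) := by
  induction l generalizing s with
  | nil => simp [PySem.List.enumerate_nil]
  | cons a t ih => simp [PySem.List.enumerate_cons, ih]

lemma pyGetD_map_banner (l : List String) (j : Int) (h0 : 0 ≤ j) (h1 : j < l.length) :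
    PySem.List.pyGetD (l.map banner_payload) j false = banner_payload (PySem.List.pyGetD l j "") := by
  obtain ⟨n, rfl⟩ : ∃ n : Nat, j = (n : Int) := ⟨j.toNat, (Int.toNat_of_nonneg h0).symm⟩
  have hn : n < l.length := by exact_mod_cast h1
  rw [PySem.List.pyGetD_natCast, PySem.List.pyGetD_natCast,
      List.getD_eq_getElem _ _ (by simpa using hn), List.getD_eq_getElem _ _ hn, List.getElem_map]

lemma all_congr_mem {α : Type} (l : List α) (f g : α → Bool)
    (h : ∀ x ∈ l, f x = g x) : l.all f = l.all g := by
  induction l with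
  | nil => rfl
  | cons a t ih =>
    simp only [List.all_cons, h a (by simp), ih (fun x hx => h x (by simp [hx]))]

lemma loops_eq (l : List String) :
    ((PySem.List.enumerate l 0).all (fun ip =>
      if banner_payload ip.2 then true
      else
        (decide (0 < ip.1) && banner_payload (PySem.List.pyGetD l (ip.1 - 1) ""))
        || (decide (ip.1 + 1 < (l.length : Int)) && banner_payload (PySem.List.pyGetD l (ip.1 + 1) ""))))
    = ((PySem.List.enumerate (l.map banner_payload) 0).all (fun im =>
      im.2 || (decide (0 < im.1) && PySem.List.pyGetD (l.map banner_payload) (im.1 - 1) false)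
           || (decide (im.1 + 1 < ((l.map banner_payload).length : Int)) && PySem.List.pyGetD (l.map banner_payload) (im.1 + 1) false))) := by
  rw [enumerate_map_eq, List.all_map]
  apply all_congr_mem
  intro p hp
  rcases (PySem.List.mem_enumerate_iff _ _ _).1 hp with ⟨k, hk, rfl⟩
  simp only [Function.comp, List.length_map, zero_add]
  have hprev : (decide (0 < (k : Int)) && PySem.List.pyGetD (l.map banner_payload) ((k : Int) - 1) false)
      = (decide (0 < (k : Int)) && banner_payload (PySem.List.pyGetD l ((k : Int) - 1) "")) := by
    by_cases hk0 : 0 < (k : Int)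
    · have h : (k : Int) - 1 = ((k - 1 : Nat) : Int) := by omega
      rw [h, pyGetD_map_banner l _ (by omega) (by omega)]
    · have hk0' : k = 0 := by omega
      subst hk0'
      simp
  have hnext : (decide ((k : Int) + 1 < (l.length : Int)) && PySem.List.pyGetD (l.map banner_payload) ((k : Int) + 1) false)
      = (decide ((k : Int) + 1 < (l.length : Int)) && banner_payload (PySem.List.pyGetD l ((k : Int) + 1) "")) := by
    by_cases hk2 : (k : Int) + 1 < (l.length : Int)
    · have h : (k : Int) + 1 = ((k + 1 : Nat) : Int) := by omega
      rw [h, pyGetD_map_banner l _ (by omega) (by exact_mod_cast hk2)]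
    · simp [hk2]
  by_cases hb : banner_payload l[k] = true
  · simp [hb]
  · have hb' : banner_payload l[k] = false := by simpa using hb
    rw [hprev, hnext, if_neg hb, hb']
    simp

lemma ends_eq (l : List String) (h : l ≠ []) :
    (PySem.List.pyGetD (l.map banner_payload) 0 false = banner_payload (PySem.List.pyGetD l 0 ""))
    ∧ (PySem.List.pyGetD (l.map banner_payload) (-1) false = banner_payload (PySem.List.pyGetD l (-1) "")) := by
  have hl : 0 < l.length := List.length_pos_iff.mpr h
  constructor
  · exact pyGetD_map_banner l 0 (by omega) (by exact_mod_cast hl)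
  · rw [PySem.List.pyGetD_neg_one _ _ (by simpa using h), PySem.List.pyGetD_neg_one _ _ h,
        List.getLast_map]

lemma hasFFF_true_cons (t : List Bool) : hasFFF (true :: t) = hasFFF t := by
  match t with
  | [] => rfl
  | [_] => rfl
  | b :: c :: r => simp [hasFFF]

lemma hasFFF_false_true (t : List Bool) : hasFFF (false :: true :: t) = hasFFF (true :: t) := by
  match t with
  | [] => rfl
  | c :: r => simp [hasFFF]

lemma bannerRunLoop_eq_runB (l : List String) (run : Nat) :
    bannerRunLoop l run = runB (l.map banner_payload) run := by
  induction l generalizing run with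
  | nil => rfl
  | cons p t ih => by_cases h : banner_payload p = true <;> simp [bannerRunLoop, runB, h, ih]

lemma runB_isNone (m : List Bool) : ∀ run, run ≤ 2 →
    (runB m run).isNone = hasFFF (List.replicate run false ++ m) := by
  induction m with
  | nil =>
    intro run h
    interval_cases run <;> rfl
  | cons c t ih =>
    intro run h
    cases c
    · by_cases h3 : run + 1 = 3
      · have : run = 2 := by omega
        subst this
        simp [runB, hasFFF]
      · have h2 : (run + 1 == 3) = false := by simpa using h3
        have hre : List.replicate run false ++ false :: t = List.replicate (run + 1) false ++ t := by
          rw [List.replicate_succ' (n := run)]; simp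
        rw [hre]
        simp only [runB, h2, Bool.false_eq_true, if_false]
        exact ih (run + 1) (by omega)
    · have hrepl : hasFFF (List.replicate run false ++ true :: t) = hasFFF t := by
        interval_cases run
        · exact hasFFF_true_cons t
        · simp only [List.replicate, List.nil_append, List.cons_append]
          rw [hasFFF_false_true, hasFFF_true_cons]
        · simp only [List.replicate, List.nil_append, List.cons_append]
          rw [show (false :: false :: true :: t) = [false] ++ (false :: true :: t) from rfl]
          simp only [List.cons_append, List.nil_append]
          rw [show hasFFF (false :: false :: true :: t) = ((!false && !false && !true) || hasFFF (false :: true :: t)) from rfl]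
          simp [hasFFF_false_true, hasFFF_true_cons]
      rw [hrepl]
      simpa [runB] using ih 0 (by omega)

lemma runB_some_last (m : List Bool) : ∀ run r, runB m run = some r →
    ((r == 0) = m.getLastD (run == 0)) := by
  induction m with
  | nil =>
    intro run r h
    simp only [runB, Option.some.injEq] at h
    subst h
    rfl
  | cons c t ih =>
    intro run r h
    cases c
    · by_cases h3 : run + 1 = 3
      · simp [runB, h3] at h
      · have h2 : (run + 1 == 3) = false := by simpa using h3
        simp only [runB, h2, Bool.false_eq_true, if_false] at h
        have hih := ih (run + 1) r h
        have h0 : ((run + 1 : Nat) == 0) = false := by simp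
        rw [h0] at hih
        rw [List.getLastD_cons]
        exact hih
    · simp only [runB, if_true] at h
      have hih := ih 0 r h
      have h0 : ((0 : Nat) == 0) = true := by simp
      rw [h0] at hih
      rw [List.getLastD_cons]
      exact hih

lemma nb3_iff (m : List Bool) : ∀ prev, (nb3 prev m = true ↔ NbP m prev) := by
  induction m with
  | nil =>
    intro prev
    constructor
    · intro _ k hk; simp at hk
    · intro _; rfl
  | cons c rest ih =>
    intro prev
    simp only [nb3, Bool.and_eq_true, Bool.or_eq_true, ih c]
    constructor
    · rintro ⟨hhead, hrest⟩ k hk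
      match k with
      | 0 =>
        rcases hhead with (hc | hp) | hh
        · left; simpa using hc
        · right; right; left; exact ⟨rfl, hp⟩
        · right; right; right
          match rest, hh with
          | r0 :: r2, hh =>
            refine ⟨by simp only [List.length_cons]; omega, ?_⟩
            simpa using hh
      | k + 1 =>
        have hk' : k < rest.length := by simpa using hk
        rcases hrest k hk' with h1 | ⟨hk0, h2⟩ | ⟨hk0, h2⟩ | ⟨hk2, h3⟩
        · left; simpa using h1
        · right; left
          refine ⟨by omega, ?_⟩
          have : k + 1 - 1 = (k - 1) + 1 := by omega
          rw [this, List.getD_cons_succ]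
          exact h2
        · subst hk0
          right; left
          exact ⟨by omega, by simpa using h2⟩
        · right; right; right
          exact ⟨by simp only [List.length_cons]; omega, by simpa using h3⟩
    · intro hP
      constructor
      · rcases hP 0 (by simp) with h1 | ⟨h0, _⟩ | ⟨_, hp⟩ | ⟨h2, h3⟩
        · left; left; simpa using h1
        · omega
        · left; right; exact hp
        · right
          match rest, h2, h3 with
          | r0 :: r2, _, h3 => simpa using h3
      · intro k hk
        rcases hP (k + 1) (by simp only [List.length_cons]; omega) with h1 | ⟨h0, h2⟩ | ⟨h0, _⟩ | ⟨h2, h3⟩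
        · left; simpa using h1
        · match k, h2 with
          | 0, h2 =>
            right; right; left
            exact ⟨rfl, by simpa using h2⟩
          | k + 1, h2 =>
            right; left
            refine ⟨by omega, ?_⟩
            have : k + 1 + 1 - 1 = (k + 1 - 1) + 1 := by omega
            rw [this] at h2
            simpa using h2
        · omega
        · right; right; right
          refine ⟨by simpa using h2, by simpa using h3⟩

lemma enumAll_iff (m : List Bool) :
    ((PySem.List.enumerate m 0).all (fun im =>
      im.2 || (decide (0 < im.1) && PySem.List.pyGetD m (im.1 - 1) false)
           || (decide (im.1 + 1 < (m.length : Int)) && PySem.List.pyGetD m (im.1 + 1) false)) = true)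
    ↔ NbP m false := by
  rw [List.all_eq_true]
  constructor
  · intro h k hk
    have hmem : ((k : Int), m[k]) ∈ PySem.List.enumerate m 0 := by
      apply (PySem.List.mem_enumerate_iff _ _ _).2
      exact ⟨k, hk, by simp⟩
    have := h _ hmem
    simp only [Bool.or_eq_true, Bool.and_eq_true, decide_eq_true_eq] at this
    rcases this with (h1 | ⟨hk0, h2⟩) | ⟨hk2, h3⟩
    · left; rw [List.getD_eq_getElem _ _ hk]; exact h1
    · right; left
      refine ⟨by omega, ?_⟩
      have he : (k : Int) - 1 = ((k - 1 : Nat) : Int) := by omega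
      rw [he, PySem.List.pyGetD_natCast] at h2
      exact h2
    · right; right; right
      have hk2' : k + 1 < m.length := by exact_mod_cast hk2
      refine ⟨hk2', ?_⟩
      have he : (k : Int) + 1 = ((k + 1 : Nat) : Int) := by omega
      rw [he, PySem.List.pyGetD_natCast] at h3
      exact h3
  · intro hP x hx
    rcases (PySem.List.mem_enumerate_iff _ _ _).1 hx with ⟨k, hk, rfl⟩
    simp only [zero_add]
    rcases hP k hk with h1 | ⟨hk0, h2⟩ | ⟨_, hfalse⟩ | ⟨hk2, h3⟩
    · rw [List.getD_eq_getElem _ _ hk] at h1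
      simp [h1]
    · have he : (k : Int) - 1 = ((k - 1 : Nat) : Int) := by omega
      simp only [Bool.or_eq_true, Bool.and_eq_true, decide_eq_true_eq]
      left; right
      exact ⟨by exact_mod_cast hk0, by rw [he, PySem.List.pyGetD_natCast]; exact h2⟩
    · cases hfalse
    · have he : (k : Int) + 1 = ((k + 1 : Nat) : Int) := by omega
      simp only [Bool.or_eq_true, Bool.and_eq_true, decide_eq_true_eq]
      right
      exact ⟨by exact_mod_cast hk2, by rw [he, PySem.List.pyGetD_natCast]; exact h3⟩

lemma hasFFF_fff (t : List Bool) : hasFFF (false :: false :: false :: t) = true := by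
  simp [hasFFF]

lemma hasFFF_ffx (t : List Bool) : hasFFF (false :: false :: true :: t) = hasFFF (false :: true :: t) := by
  simp [hasFFF]

lemma nb3_hasFFF (m : List Bool) : m ≠ [] → m.getLastD false = true →
    ∀ prev, nb3 prev m = !hasFFF ((if prev then [] else [false]) ++ m) := by
  induction m with
  | nil => intro h; exact absurd rfl h
  | cons c rest ih =>
    intro _ hlast prev
    match rest, hlast with
    | [], hlast =>
      have hc : c = true := by simpa using hlast
      subst hc
      cases prev <;> simp [nb3, hasFFF]
    | d :: r2, hlast =>
      have hlast' : (d :: r2).getLastD false = true := by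
        simpa [List.getLastD_cons] using hlast
      have hrecF := ih (by simp) hlast' false
      have hrecT := ih (by simp) hlast' true
      simp only [Bool.false_eq_true, if_false, if_true, List.singleton_append, List.nil_append] at hrecF hrecT
      cases c
      · have hbody : nb3 prev (false :: d :: r2) = ((prev || d) && nb3 false (d :: r2)) := by
          cases d <;> simp [nb3]
        rw [hbody, hrecF]
        cases prev <;> cases d <;>
          simp [hasFFF_fff, hasFFF_ffx, hasFFF_false_true, hasFFF_true_cons]
      · have hbody : nb3 prev (true :: d :: r2) = nb3 true (d :: r2) := by simp [nb3]
        rw [hbody, hrecT]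
        cases prev <;> simp [hasFFF_false_true, hasFFF_true_cons]

lemma all_id_hasFFF (m : List Bool) (h : m.all id = true) : hasFFF m = false := by
  induction m with
  | nil => rfl
  | cons c t ih =>
    simp only [List.all_cons, Bool.and_eq_true, id] at h
    rw [h.1, hasFFF_true_cons]
    exact ih h.2

lemma all_id_getLastD (m : List Bool) (h : m.all id = true) : m.getLastD true = true := by
  induction m with
  | nil => rfl
  | cons c t ih =>
    simp only [List.all_cons, Bool.and_eq_true, id] at h
    rw [List.getLastD_cons, ← h.1]
    cases t with
    | nil => simp [h.1]
    | cons d r =>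
      rw [h.1]
      exact ih h.2

lemma getLast_eq_getLastD_bool (l : List Bool) (h : l ≠ []) (d : Bool) :
    l.getLast h = l.getLastD d := by
  match l with
  | [a] => rfl
  | a :: b :: t =>
    rw [List.getLast_cons (by simp), List.getLastD_cons]
    exact getLast_eq_getLastD_bool (b :: t) (by simp) a

lemma getLastD_ne_nil {α : Type} (l : List α) (h : l ≠ []) (d1 d2 : α) :
    l.getLastD d1 = l.getLastD d2 := by
  match l with
  | [a] => rfl
  | a :: b :: t =>
    calc (a :: b :: t).getLastD d1 = (b :: t).getLastD a := List.getLastD_cons ..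
    _ = (a :: b :: t).getLastD d2 := (List.getLastD_cons ..).symm

lemma main_eq (l : List String) : is_banner_run_py l = is_banner_run_py_alt l := by
  cases l with
  | nil => rfl
  | cons a t =>
    have hne : (a :: t : List String) ≠ [] := by simp
    set m : List Bool := (a :: t).map banner_payload with hm
    have hmne : m ≠ [] := by simp [hm]
    -- ends at mask level
    have hd0 : PySem.List.pyGetD m 0 false = banner_payload (PySem.List.pyGetD (a :: t) 0 "") :=
      (ends_eq _ hne).1
    have hdl : PySem.List.pyGetD m (-1) false = banner_payload (PySem.List.pyGetD (a :: t) (-1) "") :=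
      (ends_eq _ hne).2
    have hd0' : PySem.List.pyGetD m 0 false = m.getD 0 false := by
      rw [show (0 : Int) = ((0 : Nat) : Int) from rfl, PySem.List.pyGetD_natCast]
    have hdl' : PySem.List.pyGetD m (-1) false = m.getLastD false := by
      rw [PySem.List.pyGetD_neg_one _ _ hmne]
      match m, hmne with
      | x :: y, _ => exact getLast_eq_getLastD_bool (x :: y) (by simp) false
    have hall : ((a :: t).all (fun p => banner_payload p)) = m.all id := by
      simp [hm, List.all_map]
    -- unfold both sides
    unfold is_banner_run_py is_banner_run_py_alt
    simp only [List.isEmpty_cons, Bool.false_eq_true, if_false]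
    rw [bannerRunLoop_eq_runB, ← hm, loops_eq, ← hm, hall, ← hd0, ← hdl, hd0', hdl']
    by_cases hF : hasFFF m = true
    · -- A: not all decorators; B's loop returns none
      have hnone : runB m 0 = none := by
        have := runB_isNone m 0 (by omega)
        simp only [List.replicate, List.nil_append, hF] at this
        exact Option.eq_none_iff_forall_ne_some.2 (fun x hx => by simp [hx] at this)
      have hnall : m.all id = false := by
        by_contra hc
        have : m.all id = true := by simpa using hc
        rw [all_id_hasFFF m this] at hF
        exact Bool.false_ne_true hF
      rw [hnall, hnone]
      simp only [Bool.false_eq_true, if_false]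
      by_cases hd : m.getD 0 false = true
      · by_cases hl : m.getLastD false = true
        · rw [hd, hl]
          simp only [Bool.not_true, Bool.or_self, Bool.false_eq_true, if_false]
          -- head of m is true, so false::m has no new fff; A's scan fails
          have hnb := (enumAll_iff m)
          have hnb3 := nb3_hasFFF m hmne hl false
          simp only [if_neg (Bool.false_ne_true), List.singleton_append] at hnb3
          have hm0 : ∃ m', m = true :: m' := by
            match m, hd with
            | x :: y, hd => exact ⟨y, by simpa using hd⟩
          rcases hm0 with ⟨m', hm'⟩
          have : hasFFF (false :: m) = true := by
            rw [hm', hasFFF_false_true, hasFFF_true_cons, ← hasFFF_true_cons, ← hm']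
            exact hF
          rw [this] at hnb3
          simp only [Bool.not_true] at hnb3
          -- so nb3 false m = false, hence enumerate-all is false
          cases hcase : ((PySem.List.enumerate m 0).all _)
          · rfl
          · exfalso
            have := (enumAll_iff m).1 hcase
            have := (nb3_iff m false).2 this
            rw [hnb3] at this
            exact Bool.false_ne_true this
        · rw [Bool.eq_false_iff.2 hl]
          simp
      · rw [Bool.eq_false_iff.2 hd]
        simp
    · -- no fff: B's loop returns some r with (r == 0) = last
      have hF' : hasFFF m = false := by simpa using hF
      have hsome : ∃ r, runB m 0 = some r := by
        have := runB_isNone m 0 (by omega)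
        simp only [List.replicate, List.nil_append, hF'] at this
        match hr : runB m 0 with
        | some r => exact ⟨r, rfl⟩
        | none => rw [hr] at this; simp at this
      rcases hsome with ⟨r, hr⟩
      have hrlast : (r == 0) = m.getLastD true := runB_some_last m 0 r hr
      have hrlast' : (r == 0) = m.getLastD false := by
        rw [hrlast]; exact getLastD_ne_nil m hmne true false
      rw [hr]
      by_cases hA : m.all id = true
      · rw [hA]
        have hd : m.getD 0 false = true := by
          match m, hA with
          | x :: y, hA =>
            simp only [List.all_cons, Bool.and_eq_true, id] at hA
            simpa using hA.1
        have hl : m.getLastD false = true := by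
          rw [getLastD_ne_nil m hmne false true]
          exact all_id_getLastD m hA
        rw [if_pos rfl]
        show true = ((r == 0) && m.getD 0 false)
        rw [hrlast', hl, hd]
        rfl
      · rw [Bool.eq_false_iff.2 hA]
        simp only [Bool.false_eq_true, if_false]
        by_cases hd : m.getD 0 false = true
        · by_cases hl : m.getLastD false = true
          · rw [hd, hl]
            simp only [Bool.not_true, Bool.or_self, Bool.false_eq_true, if_false, hrlast', hl]
            -- A's scan succeeds: nb3 false m = !hasFFF (false::m) = true
            have hnb3 := nb3_hasFFF m hmne hl false
            simp only [if_neg (Bool.false_ne_true), List.singleton_append] at hnb3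
            have hm0 : ∃ m', m = true :: m' := by
              match m, hd with
              | x :: y, hd => exact ⟨y, by simpa using hd⟩
            rcases hm0 with ⟨m', hm'⟩
            have hfm : hasFFF (false :: m) = false := by
              rw [hm', hasFFF_false_true, hasFFF_true_cons, ← hasFFF_true_cons, ← hm']
              exact hF'
            rw [hfm] at hnb3
            simp only [Bool.not_false] at hnb3
            rw [(enumAll_iff m).2 ((nb3_iff m false).1 hnb3)]
            decide
          · have hl' : m.getLastD false = false := Bool.eq_false_iff.2 hl
            rw [hl', hrlast', hl']
            simp
        · have hd' : m.getD 0 false = false := Bool.eq_false_iff.2 hd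
          rw [hd']
          simp

-- ===== VERDICT (by name: the statement is the Claim_ definition above) =====
theorem is_banner_run_py_spec : Claim_equal_is_banner_run_py := by
  intro payloads _
  unfold Spec_is_banner_run_py
  exact main_eq payloads
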